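-- pv_equiv track=rewrite | github.com/sh-pirmatovv/makebiz | backend/pipeline.py | merge_companies_with_links
-- ===== SOURCE A (Python) =====
-- def merge_companies_with_links(companies: list[dict], links_rows: list[dict]) -> list[dict]:
--     by_url = {row['source_url']: row for row in companies if row.get('source_url')}
--     for link_row in links_rows:
--         url = link_row.get('source_url')
--         if not url or url not in by_url:
--             continue
--         if by_url[url].get('inn', '-') in {'', '-'} and link_row.get('inn', '-') not in {'', '-'}:
--             by_url[url]['inn'] = link_row['inn']
--     return list(by_url.values())
-- ===== SOURCE B (Python) =====
-- def merge_companies_with_links(companies: list[dict], links_rows: list[dict]) -> list[dict]: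
--     # Pre-aggregate: first valid inn per url, then one pass over the companies.
--     link_inn = {}
--     for lr in links_rows:
--         url = lr.get('source_url')
--         inn = lr.get('inn', '-')
--         if url and inn not in ('', '-') and url not in link_inn:
--             link_inn[url] = inn
--     by_url = {row['source_url']: row for row in companies if row.get('source_url')}
--     for url, row in by_url.items():
--         if row.get('inn', '-') in ('', '-') and url in link_inn:
--             row['inn'] = link_inn[url]
--     return list(by_url.values())
-- ===== Notes on version B (the rewrite author's own statement) =====
-- stated objective: alternative
-- what changed: B replaces A's per-link loop that repeatedly probes and mutates the company dict with a two-phase decomposition: one pass over links_rows building a first-valid-inn-per-url index, then one pass over the companies filling blank inns from that index.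
import Mathlib
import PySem

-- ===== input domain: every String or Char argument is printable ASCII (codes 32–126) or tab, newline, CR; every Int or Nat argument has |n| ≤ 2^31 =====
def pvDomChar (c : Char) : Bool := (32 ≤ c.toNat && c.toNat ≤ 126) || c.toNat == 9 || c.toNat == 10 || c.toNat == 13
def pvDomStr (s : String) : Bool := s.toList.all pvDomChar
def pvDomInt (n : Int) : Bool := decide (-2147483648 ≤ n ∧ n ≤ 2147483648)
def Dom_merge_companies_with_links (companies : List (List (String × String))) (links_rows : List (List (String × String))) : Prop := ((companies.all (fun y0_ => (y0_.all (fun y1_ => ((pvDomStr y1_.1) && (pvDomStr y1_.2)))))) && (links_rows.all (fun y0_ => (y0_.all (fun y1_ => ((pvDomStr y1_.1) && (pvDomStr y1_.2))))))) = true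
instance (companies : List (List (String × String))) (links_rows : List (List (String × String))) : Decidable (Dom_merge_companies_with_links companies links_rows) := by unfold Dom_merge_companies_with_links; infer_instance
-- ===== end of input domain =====

-- B merges link INNs into companies via a pre-built first-valid-inn-per-url index instead of A's
-- per-link probe-and-mutate loop (objective: alternative decomposition, same cost).
-- Both Pythons mutate the company dicts in place identically; the theorems below are about the return value.

-- row.get(k, dflt) on a row dict (rows are association lists under the type convention)
def pvRowGetD (row : List (String × String)) (k dflt : String) : String :=
  (PySem.Dict.mk row).getD k dflt

-- ===== PORT A =====
-- by_url = {row['source_url']: row for row in companies if row.get('source_url')}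
def pvStepCompany (d : PySem.Dict String (List (String × String))) (row : List (String × String)) :
    PySem.Dict String (List (String × String)) :=
  if pvRowGetD row "source_url" "" ≠ "" then d.insert (pvRowGetD row "source_url" "") row else d

-- one iteration of A's 'for link_row in links_rows' loop ('url not in by_url' is the none branch;
-- link_row['inn'] is written pvRowGetD lr "inn" "-", equal since the guard ensures the key is present)
def pvStepLink (d : PySem.Dict String (List (String × String))) (lr : List (String × String)) :
    PySem.Dict String (List (String × String)) :=
  if pvRowGetD lr "source_url" "" = "" then d
  else
    match d.get? (pvRowGetD lr "source_url" "") with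
    | none => d
    | some row =>
      if (pvRowGetD row "inn" "-" = "" ∨ pvRowGetD row "inn" "-" = "-") ∧
         ¬(pvRowGetD lr "inn" "-" = "" ∨ pvRowGetD lr "inn" "-" = "-") then
        d.insert (pvRowGetD lr "source_url" "")
          (((PySem.Dict.mk row).insert "inn" (pvRowGetD lr "inn" "-")).items)
      else d

def merge_companies_with_links (companies : List (List (String × String))) (links_rows : List (List (String × String))) : List (List (String × String)) :=
  (links_rows.foldl pvStepLink (companies.foldl pvStepCompany PySem.Dict.empty)).values

-- ===== PORT B =====
-- one iteration of B's index-building loop: keep the FIRST valid inn per url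
def pvStepLinkIdx (m : PySem.Dict String String) (lr : List (String × String)) :
    PySem.Dict String String :=
  if pvRowGetD lr "source_url" "" ≠ "" ∧ pvRowGetD lr "inn" "-" ≠ "" ∧ pvRowGetD lr "inn" "-" ≠ "-" ∧
     m.contains (pvRowGetD lr "source_url" "") = false then
    m.insert (pvRowGetD lr "source_url" "") (pvRowGetD lr "inn" "-")
  else m

-- one company item of B's filling pass: fill a blank inn from the index (in-place value update)
def pvApplyInn (f : String → Option String) (p : String × List (String × String)) :
    String × List (String × String) :=
  if (pvRowGetD p.2 "inn" "-" = "" ∨ pvRowGetD p.2 "inn" "-" = "-") ∧ (f p.1).isSome then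
    (p.1, ((PySem.Dict.mk p.2).insert "inn" ((f p.1).getD "")).items)
  else p

def merge_companies_with_links_alt (companies : List (List (String × String))) (links_rows : List (List (String × String))) : List (List (String × String)) :=
  let linkInn := links_rows.foldl pvStepLinkIdx PySem.Dict.empty
  let byUrl := companies.foldl pvStepCompany PySem.Dict.empty
  (byUrl.items.map (pvApplyInn (fun u => linkInn.get? u))).map (·.2)

-- ===== PRECONDITION & SPEC =====
def Spec_merge_companies_with_links (companies : List (List (String × String))) (links_rows : List (List (String × String))) (out : List (List (String × String))) : Prop := out = merge_companies_with_links_alt companies links_rows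
instance (companies : List (List (String × String))) (links_rows : List (List (String × String))) (out : List (List (String × String))) : Decidable (Spec_merge_companies_with_links companies links_rows out) := by unfold Spec_merge_companies_with_links; infer_instance

-- ===== CLAIM (what is proved, stated in full; the proofs are below) =====
def Claim_equal_merge_companies_with_links : Prop := ∀ (companies : List (List (String × String))) (links_rows : List (List (String × String))), Dom_merge_companies_with_links companies links_rows → Spec_merge_companies_with_links companies links_rows (merge_companies_with_links companies links_rows)

-- ===== LEMMAS AND PROOFS =====

-- the first valid (nonempty url, non-blank inn) link inn for a given url
def pvFirstInn : List (List (String × String)) → String → Option String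
  | [], _ => none
  | lr :: rest, u =>
    if pvRowGetD lr "source_url" "" = u ∧ pvRowGetD lr "source_url" "" ≠ "" ∧
       ¬(pvRowGetD lr "inn" "-" = "" ∨ pvRowGetD lr "inn" "-" = "-") then
      some (pvRowGetD lr "inn" "-")
    else pvFirstInn rest u

-- helper congruences for pvFirstInn / pvApplyInn
theorem pvApplyInn_congr (f g : String → Option String) (p : String × List (String × String))
    (h : f p.1 = g p.1) : pvApplyInn f p = pvApplyInn g p := by
  simp only [pvApplyInn, h]

theorem pvFirstInn_cons_ne (lr : List (String × String)) (rest : List (List (String × String)))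
    (u : String) (h : pvRowGetD lr "source_url" "" ≠ u) :
    pvFirstInn (lr :: rest) u = pvFirstInn rest u := by
  simp only [pvFirstInn]
  rw [if_neg]
  rintro ⟨h1, -⟩
  exact h h1

theorem pvFirstInn_cons_invalid (lr : List (String × String)) (rest : List (List (String × String)))
    (u : String)
    (h : ¬(pvRowGetD lr "source_url" "" ≠ "" ∧
          ¬(pvRowGetD lr "inn" "-" = "" ∨ pvRowGetD lr "inn" "-" = "-"))) :
    pvFirstInn (lr :: rest) u = pvFirstInn rest u := by
  simp only [pvFirstInn]
  rw [if_neg]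
  rintro ⟨-, h2, h3⟩
  exact h ⟨h2, h3⟩

-- B's index lookup is pvFirstInn (first-wins fold characterisation)
theorem pv_get?_foldl_stepLinkIdx (links : List (List (String × String)))
    (m : PySem.Dict String String) (u : String) :
    (links.foldl pvStepLinkIdx m).get? u = (m.get? u).or (pvFirstInn links u) := by
  induction links generalizing m with
  | nil => simp [pvFirstInn]
  | cons lr rest ih =>
    simp only [List.foldl_cons]
    rw [ih]
    unfold pvStepLinkIdx
    split
    · rename_i hcond
      obtain ⟨hu, h1, h2, hc⟩ := hcond
      rw [PySem.Dict.get?_insert]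
      by_cases he : u = pvRowGetD lr "source_url" ""
      · subst he
        have hm : m.get? (pvRowGetD lr "source_url" "") = none :=
          (PySem.Dict.get?_eq_none_iff_contains m _).mpr hc
        have hfi : pvFirstInn (lr :: rest) (pvRowGetD lr "source_url" "") =
            some (pvRowGetD lr "inn" "-") := by
          simp only [pvFirstInn]
          simp [hu, h1, h2]
        simp [hm, hfi]
      · rw [if_neg he, pvFirstInn_cons_ne lr rest u (fun hq => he hq.symm)]
    · rename_i hcond
      by_cases hfi : pvRowGetD lr "source_url" "" = u ∧ pvRowGetD lr "source_url" "" ≠ "" ∧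
          ¬(pvRowGetD lr "inn" "-" = "" ∨ pvRowGetD lr "inn" "-" = "-")
      · obtain ⟨hequ, h1, h2⟩ := hfi
        have hc : m.contains (pvRowGetD lr "source_url" "") = true := by
          by_contra hc'
          exact hcond ⟨h1, fun hx => h2 (Or.inl hx), fun hx => h2 (Or.inr hx),
            Bool.eq_false_iff.mpr hc'⟩
        have hs : (m.get? u).isSome := by
          rw [← hequ, ← PySem.Dict.contains_eq_isSome_get?]
          exact hc
        obtain ⟨v, hv⟩ := Option.isSome_iff_exists.mp hs
        rw [hv]
        simp
      · have hrw : pvFirstInn (lr :: rest) u = pvFirstInn rest u := by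
          simp only [pvFirstInn]
          rw [if_neg hfi]
        rw [hrw]

theorem pv_nodup_stepLink (d : PySem.Dict String (List (String × String)))
    (lr : List (String × String)) (h : d.keys.Nodup) : (pvStepLink d lr).keys.Nodup := by
  unfold pvStepLink
  split
  · exact h
  · split
    · exact h
    · split
      · exact PySem.Dict.nodup_keys_insert _ _ _ h
      · exact h

-- A's link loop acts on a nodup-keyed dict exactly as B's filling pass with pvFirstInn
theorem pv_foldl_stepLink_eq (links : List (List (String × String)))
    (d : PySem.Dict String (List (String × String))) (h : d.keys.Nodup) :
    links.foldl pvStepLink d = PySem.Dict.mk (d.items.map (pvApplyInn (pvFirstInn links))) := by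
  induction links generalizing d with
  | nil =>
    have hid : ∀ p, pvApplyInn (pvFirstInn []) p = p := by
      intro p
      simp [pvApplyInn, pvFirstInn]
    have hmap : d.items.map (pvApplyInn (pvFirstInn [])) = d.items := by
      rw [List.map_congr_left (fun p _ => hid p)]
      simp
    rw [List.foldl_nil, hmap]
  | cons lr rest ih =>
    simp only [List.foldl_cons]
    rw [ih _ (pv_nodup_stepLink d lr h)]
    congr 1
    by_cases hval : pvRowGetD lr "source_url" "" ≠ "" ∧
        ¬(pvRowGetD lr "inn" "-" = "" ∨ pvRowGetD lr "inn" "-" = "-")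
    · obtain ⟨hu, hi⟩ := hval
      cases hget : d.get? (pvRowGetD lr "source_url" "") with
      | none =>
        have hstep : pvStepLink d lr = d := by
          unfold pvStepLink
          rw [if_neg hu, hget]
        rw [hstep]
        apply List.map_congr_left
        intro p hp
        have hne : pvRowGetD lr "source_url" "" ≠ p.1 := by
          intro hq
          have hk : p.1 ∈ d.keys := PySem.Dict.mem_keys_of_mem_items d hp
          rw [← hq] at hk
          exact ((PySem.Dict.get?_eq_none_iff_not_mem_keys d _).mp hget) hk
        exact pvApplyInn_congr _ _ p (pvFirstInn_cons_ne lr rest p.1 hne).symm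
      | some row =>
        have hcont : d.contains (pvRowGetD lr "source_url" "") = true := by
          rw [PySem.Dict.contains_eq_isSome_get?, hget]
          rfl
        by_cases hblank : pvRowGetD row "inn" "-" = "" ∨ pvRowGetD row "inn" "-" = "-"
        · have hstep : pvStepLink d lr =
              d.insert (pvRowGetD lr "source_url" "")
                (((PySem.Dict.mk row).insert "inn" (pvRowGetD lr "inn" "-")).items) := by
            unfold pvStepLink
            rw [if_neg hu, hget]
            exact if_pos ⟨hblank, hi⟩
          rw [hstep, PySem.Dict.items_insert_of_contains d _ hcont, List.map_map]
          apply List.map_congr_left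
          intro p hp
          by_cases hpk : p.1 = pvRowGetD lr "source_url" ""
          · have hp2 : p.2 = row := by
              have h2 := PySem.Dict.get?_of_mem_items d (k := p.1) (v := p.2) hp h
              rw [hpk, hget] at h2
              exact (Option.some_inj.mp h2).symm
            have hfi : pvFirstInn (lr :: rest) p.1 = some (pvRowGetD lr "inn" "-") := by
              simp only [pvFirstInn]
              rw [if_pos ⟨hpk.symm, hu, hi⟩]
            have hrow' : pvRowGetD (((PySem.Dict.mk row).insert "inn" (pvRowGetD lr "inn" "-")).items)
                "inn" "-" = pvRowGetD lr "inn" "-" :=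
              PySem.Dict.getD_insert_self (PySem.Dict.mk row) "inn" (pvRowGetD lr "inn" "-") "-"
            have hg : (if (p.1 == pvRowGetD lr "source_url" "") = true
                then (pvRowGetD lr "source_url" "",
                  ((PySem.Dict.mk row).insert "inn" (pvRowGetD lr "inn" "-")).items) else p) =
                (pvRowGetD lr "source_url" "",
                  ((PySem.Dict.mk row).insert "inn" (pvRowGetD lr "inn" "-")).items) := by
              rw [if_pos (by simp [hpk])]
            have hL : pvApplyInn (pvFirstInn rest)
                (pvRowGetD lr "source_url" "",
                  ((PySem.Dict.mk row).insert "inn" (pvRowGetD lr "inn" "-")).items) =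
                (pvRowGetD lr "source_url" "",
                  ((PySem.Dict.mk row).insert "inn" (pvRowGetD lr "inn" "-")).items) := by
              simp only [pvApplyInn]
              rw [if_neg]
              rintro ⟨hb, -⟩
              rw [hrow'] at hb
              exact hi hb
            have hR : pvApplyInn (pvFirstInn (lr :: rest)) p =
                (pvRowGetD lr "source_url" "",
                  ((PySem.Dict.mk row).insert "inn" (pvRowGetD lr "inn" "-")).items) := by
              simp only [pvApplyInn]
              rw [hfi, hp2, hpk, if_pos ⟨hblank, rfl⟩]
              rfl
            simp only [Function.comp_apply, hg]
            rw [hL, hR]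
          · have hg : (if (p.1 == pvRowGetD lr "source_url" "") = true
                then (pvRowGetD lr "source_url" "",
                  ((PySem.Dict.mk row).insert "inn" (pvRowGetD lr "inn" "-")).items) else p) = p := by
              rw [if_neg (by simp [hpk])]
            simp only [Function.comp_apply, hg]
            exact pvApplyInn_congr _ _ p
              (pvFirstInn_cons_ne lr rest p.1 (fun hq => hpk hq.symm)).symm
        · have hstep : pvStepLink d lr = d := by
            unfold pvStepLink
            rw [if_neg hu, hget]
            exact if_neg (fun hc => hblank hc.1)
          rw [hstep]
          apply List.map_congr_left
          intro p hp
          by_cases hpk : p.1 = pvRowGetD lr "source_url" ""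
          · have hp2 : p.2 = row := by
              have h2 := PySem.Dict.get?_of_mem_items d (k := p.1) (v := p.2) hp h
              rw [hpk, hget] at h2
              exact (Option.some_inj.mp h2).symm
            simp only [pvApplyInn, hp2]
            rw [if_neg (fun hc => hblank hc.1), if_neg (fun hc => hblank hc.1)]
          · exact pvApplyInn_congr _ _ p
              (pvFirstInn_cons_ne lr rest p.1 (fun hq => hpk hq.symm)).symm
    · have hstep : pvStepLink d lr = d := by
        unfold pvStepLink
        by_cases hu : pvRowGetD lr "source_url" "" = ""
        · rw [if_pos hu]
        · have hi : pvRowGetD lr "inn" "-" = "" ∨ pvRowGetD lr "inn" "-" = "-" := by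
            by_contra hi'
            exact hval ⟨hu, hi'⟩
          rw [if_neg hu]
          cases hget : d.get? (pvRowGetD lr "source_url" "") with
          | none => rfl
          | some row => exact if_neg (fun hc => hc.2 hi)
      rw [hstep]
      apply List.map_congr_left
      intro p hp
      exact pvApplyInn_congr _ _ p (pvFirstInn_cons_invalid lr rest p.1 hval).symm

theorem pv_nodup_byUrl (companies : List (List (String × String))) :
    (companies.foldl pvStepCompany PySem.Dict.empty).keys.Nodup := by
  have : ∀ (l : List (List (String × String))) (d : PySem.Dict String (List (String × String))),
      d.keys.Nodup → (l.foldl pvStepCompany d).keys.Nodup := by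
    intro l
    induction l with
    | nil => intro d hd; exact hd
    | cons r t iht =>
      intro d hd
      simp only [List.foldl_cons]
      apply iht
      unfold pvStepCompany
      split
      · exact PySem.Dict.nodup_keys_insert _ _ _ hd
      · exact hd
  exact this companies PySem.Dict.empty (PySem.Dict.nodup_keys_empty)

-- ===== VERDICT (by name: the statement is the Claim_ definition above) =====
theorem merge_companies_with_links_spec : Claim_equal_merge_companies_with_links := by
  intro companies links_rows _
  unfold Spec_merge_companies_with_links merge_companies_with_links merge_companies_with_links_alt
  rw [pv_foldl_stepLink_eq links_rows _ (pv_nodup_byUrl companies)]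
  have hf : ∀ u, (links_rows.foldl pvStepLinkIdx PySem.Dict.empty).get? u = pvFirstInn links_rows u := by
    intro u
    rw [pv_get?_foldl_stepLinkIdx]
    simp [PySem.Dict.get?_empty]
  simp only [PySem.Dict.values, List.map_map]
  apply List.map_congr_left
  intro p hp
  simp only [Function.comp_apply]
  rw [pvApplyInn_congr _ _ p (hf p.1)]
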